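-- pv_equiv track=rewrite | github.com/quiznat/tot-hf-survey-artifacts | phase2/code/scripts/build_protocol_v3_panels.py | _best_permutation
-- ===== SOURCE A (Python) =====
-- import itertools
--
-- def _best_permutation(digits: list[int], divisor: int) -> int | None:
--     best: int | None = None
--     for perm in itertools.permutations(digits, 4):
--         if perm[0] == 0:
--             continue
--         value = (perm[0] * 1000) + (perm[1] * 100) + (perm[2] * 10) + perm[3]
--         if value % divisor != 0:
--             continue
--         if best is None or value > best:
--             best = value
--     return best
-- ===== SOURCE B (Python) =====
-- def _best_permutation(digits: list[int], divisor: int) -> int | None: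
--     # Count multiplicities once, then enumerate ordered quadruples of DISTINCT
--     # values, checking availability against the counts (duplicates collapse).
--     counts = {}
--     for x in digits:
--         counts[x] = counts.get(x, 0) + 1
--     vals = sorted(counts)
--     best = None
--     for a in vals:
--         if a == 0:
--             continue
--         for b in vals:
--             if counts[b] < 1 + (b == a):
--                 continue
--             for c in vals:
--                 if counts[c] < 1 + (c == a) + (c == b):
--                     continue
--                 pre = a * 1000 + b * 100 + c * 10
--                 for d in vals:
--                     if counts[d] < 1 + (d == a) + (d == b) + (d == c):
--                         continue
--                     value = pre + d
--                     if value % divisor == 0 and (best is None or value > best):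
--                         best = value
--     return best
-- ===== Notes on version B (the rewrite author's own statement) =====
-- stated objective: alternative
-- what changed: B builds a multiplicity dict of the digits once and enumerates ordered quadruples of distinct values with triangular availability checks against the counts, instead of A's scan over all 4-permutations of list positions.
import Mathlib
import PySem

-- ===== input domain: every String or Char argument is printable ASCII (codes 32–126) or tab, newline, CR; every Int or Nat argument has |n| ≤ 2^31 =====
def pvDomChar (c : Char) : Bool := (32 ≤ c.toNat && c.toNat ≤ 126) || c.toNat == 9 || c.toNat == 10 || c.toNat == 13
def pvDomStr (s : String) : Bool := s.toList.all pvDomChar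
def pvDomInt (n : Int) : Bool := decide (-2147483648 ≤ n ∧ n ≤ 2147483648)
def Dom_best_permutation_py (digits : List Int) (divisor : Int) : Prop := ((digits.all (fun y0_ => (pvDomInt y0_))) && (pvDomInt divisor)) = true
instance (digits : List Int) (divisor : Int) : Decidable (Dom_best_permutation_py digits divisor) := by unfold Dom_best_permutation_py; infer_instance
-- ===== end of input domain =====

-- B replaces A's scan over all 4-permutations of positions with a multiplicity dict and a scan
-- over ordered quadruples of DISTINCT values (availability checked against the counts).

-- shared port of the update snippet 'if best is None or value > best: best = value'
def bestUpd (best : Option Int) (v : Int) : Option Int :=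
  match best with
  | none => some v
  | some b => if v > b then some v else some b

-- ===== PORT A =====
def best_permutation_py (digits : List Int) (divisor : Int) : Option Int :=
  (PySem.List.permutations digits 4).foldl (fun best perm =>
    match perm with
    | [a, b, c, d] =>
      if a = 0 then best
      else
        let value := a * 1000 + b * 100 + c * 10 + d
        if PySem.Int.mod value divisor ≠ 0 then best
        else bestUpd best value
    | _ => best) none

-- ===== PORT B =====
def best_permutation_py_alt (digits : List Int) (divisor : Int) : Option Int :=
  let counts := PySem.Dict.counter digits
  let vals := PySem.List.sorted counts.keys (fun x => x) false
  vals.foldl (fun best a =>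
    if a = 0 then best else
    vals.foldl (fun best b =>
      if counts.getD b 0 < 1 + (if b = a then (1:Int) else 0) then best else
      vals.foldl (fun best c =>
        if counts.getD c 0 < 1 + (if c = a then (1:Int) else 0) + (if c = b then (1:Int) else 0) then best else
        let pre := a * 1000 + b * 100 + c * 10
        vals.foldl (fun best d =>
          if counts.getD d 0 < 1 + (if d = a then (1:Int) else 0) + (if d = b then (1:Int) else 0) + (if d = c then (1:Int) else 0) then best else
          let value := pre + d
          if PySem.Int.mod value divisor = 0 then bestUpd best value else best) best) best) best) none

-- ===== PRECONDITION & SPEC =====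
-- Pre_ excludes exactly the inputs on which the Python A raises ZeroDivisionError
-- (divisor 0 while some 4-permutation has a nonzero leading digit); B raises there too.
def Pre_best_permutation_py (digits : List Int) (divisor : Int) : Prop :=
  ¬ (divisor = 0 ∧ 4 ≤ digits.length ∧ ∃ x ∈ digits, x ≠ 0)
instance (digits : List Int) (divisor : Int) : Decidable (Pre_best_permutation_py digits divisor) := by unfold Pre_best_permutation_py; infer_instance

def pvWitness_best_permutation_py : List Int × Int := ([9, 8, 7, 6, 5], 3)

def Spec_best_permutation_py (digits : List Int) (divisor : Int) (out : Option Int) : Prop := out = best_permutation_py_alt digits divisor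
instance (digits : List Int) (divisor : Int) (out : Option Int) : Decidable (Spec_best_permutation_py digits divisor out) := by unfold Spec_best_permutation_py; infer_instance

-- ===== CLAIM (what is proved, stated in full; the proofs are below) =====
def Claim_equal_best_permutation_py : Prop := ∀ (digits : List Int) (divisor : Int), Dom_best_permutation_py digits divisor → Pre_best_permutation_py digits divisor → Spec_best_permutation_py digits divisor (best_permutation_py digits divisor)

-- ===== LEMMAS AND PROOFS =====

def valOf (a b c d : Int) : Int := a * 1000 + b * 100 + c * 10 + d

-- the per-permutation candidate of A's loop body
def fA (divisor : Int) (p : List Int) : Option Int :=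
  match p with
  | [a, b, c, d] =>
    if a = 0 then none
    else if PySem.Int.mod (valOf a b c d) divisor ≠ 0 then none
    else some (valOf a b c d)
  | _ => none

-- the Nat-count availability conditions behind B's triangular checks
def condB (digits : List Int) (a b c d : Int) : Prop :=
  0 < digits.count a ∧
  1 + (if b = a then 1 else 0) ≤ digits.count b ∧
  1 + (if c = a then 1 else 0) + (if c = b then 1 else 0) ≤ digits.count c ∧
  1 + (if d = a then 1 else 0) + (if d = b then 1 else 0) + (if d = c then 1 else 0) ≤ digits.count d

-- B's candidate list, spelled out
def candB (digits : List Int) (divisor : Int) : List Int :=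
  let counts := PySem.Dict.counter digits
  let vals := PySem.List.sorted counts.keys (fun x => x) false
  vals.flatMap (fun a =>
    if a = 0 then [] else
    vals.flatMap (fun b =>
      if counts.getD b 0 < 1 + (if b = a then (1:Int) else 0) then [] else
      vals.flatMap (fun c =>
        if counts.getD c 0 < 1 + (if c = a then (1:Int) else 0) + (if c = b then (1:Int) else 0) then [] else
        vals.filterMap (fun d =>
          if counts.getD d 0 < 1 + (if d = a then (1:Int) else 0) + (if d = b then (1:Int) else 0) + (if d = c then (1:Int) else 0) then none
          else if PySem.Int.mod (valOf a b c d) divisor = 0 then some (valOf a b c d) else none))))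

lemma bestUpd_some (m v : Int) : bestUpd (some m) v = some (max m v) := by
  simp only [bestUpd]
  split_ifs with h <;> congr 1 <;> omega

lemma foldl_bestUpd_filterMap {α : Type} (f : α → Option Int) (l : List α) (init : Option Int) :
    l.foldl (fun best x => match f x with | some v => bestUpd best v | none => best) init
      = (l.filterMap f).foldl bestUpd init := by
  induction l generalizing init with
  | nil => rfl
  | cons x t ih => cases hfx : f x <;> simp [hfx, ih]

lemma foldl_bestUpd_flatMap {α : Type} (g : α → List Int) (l : List α) (init : Option Int) :
    l.foldl (fun best x => (g x).foldl bestUpd best) init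
      = (l.flatMap g).foldl bestUpd init := by
  induction l generalizing init with
  | nil => rfl
  | cons x t ih => simp [List.flatMap_cons, List.foldl_append, ih]

lemma foldl_bestUpd_some (l : List Int) (m : Int) :
    l.foldl bestUpd (some m) = some (l.foldl max m) := by
  induction l generalizing m with
  | nil => rfl
  | cons x t ih => simp [bestUpd_some, ih]

lemma foldl_bestUpd_none (l : List Int) : l.foldl bestUpd none = l.max? := by
  cases l with
  | nil => rfl
  | cons x t => simp [List.max?, bestUpd, foldl_bestUpd_some]

lemma max?_eq_of_mem_iff {l1 l2 : List Int} (h : ∀ x, x ∈ l1 ↔ x ∈ l2) :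
    l1.max? = l2.max? := by
  cases h1 : l1.max? with
  | none =>
    rw [List.max?_eq_none_iff] at h1
    subst h1
    cases h2 : l2.max? with
    | none => rfl
    | some m =>
      exact absurd ((h m).mpr (List.max?_eq_some_iff.mp h2).1) (List.not_mem_nil)
  | some m =>
    rw [List.max?_eq_some_iff] at h1
    exact (List.max?_eq_some_iff.mpr ⟨(h m).mp h1.1, fun b hb => h1.2 b ((h b).mpr hb)⟩).symm

-- completeness of PySem.List.permutations: any subpermutation of length r is enumerated
lemma mem_permutations_of_subperm :
    ∀ (p xs : List Int), p.Subperm xs → p ∈ PySem.List.permutations xs p.length := by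
  intro p
  induction p with
  | nil => intro xs _; simp [PySem.List.permutations_zero]
  | cons a p' ih =>
    intro xs h
    have ha : a ∈ xs := h.subset (List.mem_cons_self)
    obtain ⟨i, hi⟩ := List.mem_iff_getElem?.mp ha
    have hperm := PySem.List.perm_cons_eraseIdx xs hi
    have hp' : p'.Subperm (xs.eraseIdx i) :=
      (List.subperm_cons a).mp (h.trans hperm.symm.subperm)
    rw [List.length_cons, PySem.List.permutations_succ, List.mem_flatMap]
    refine ⟨i, ?_, ?_⟩
    · rw [List.mem_range]
      exact (List.getElem?_eq_some_iff.mp hi).1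
    · simp only [hi, List.mem_map]
      exact ⟨p', ih _ hp', rfl⟩

lemma subperm_of_mem_permutations {p xs : List Int} {r : Nat}
    (h : p ∈ PySem.List.permutations xs r) : p.Subperm xs := by
  obtain ⟨-, rest, hperm⟩ := PySem.List.exists_perm_of_mem_permutations r xs p h
  exact ((List.sublist_append_left p rest).subperm).trans hperm.subperm

lemma cons_subperm_iff (a : Int) (l L : List Int) :
    (a :: l).Subperm L ↔ a ∈ L ∧ l.Subperm (L.erase a) := by
  constructor
  · intro h
    have ha : a ∈ L := h.subset (List.mem_cons_self)
    exact ⟨ha, (List.subperm_cons a).mp (h.trans (List.perm_cons_erase ha).subperm)⟩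
  · rintro ⟨ha, hl⟩
    exact ((List.subperm_cons a).mpr hl).trans (List.perm_cons_erase ha).symm.subperm

-- B's triangular count checks say exactly "the multiset {a,b,c,d} fits inside digits"
set_option maxHeartbeats 2000000 in
lemma subperm_quad_iff (digits : List Int) (a b c d : Int) :
    [a, b, c, d].Subperm digits ↔ condB digits a b c d := by
  rw [cons_subperm_iff, cons_subperm_iff, cons_subperm_iff, cons_subperm_iff]
  unfold condB
  have hnil : ∀ L : List Int, List.Subperm [] L := fun L => List.nil_subperm
  simp only [hnil, and_true]
  rw [← List.count_pos_iff, ← List.count_pos_iff, ← List.count_pos_iff, ← List.count_pos_iff]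
  rw [List.count_erase, List.count_erase, List.count_erase, List.count_erase, List.count_erase,
    List.count_erase]
  simp only [beq_iff_eq]
  constructor
  · rintro ⟨p1, p2, p3, p4⟩
    refine ⟨p1, ?_, ?_, ?_⟩ <;> split_ifs at * <;> omega
  · rintro ⟨p1, p2, p3, p4⟩
    refine ⟨p1, ?_, ?_, ?_⟩ <;> split_ifs at * <;> omega

-- A as the max? of its candidate list
lemma A_eq_max? (digits : List Int) (divisor : Int) :
    best_permutation_py digits divisor
      = ((PySem.List.permutations digits 4).filterMap (fA divisor)).max? := by
  have hf : ∀ (best : Option Int) (p : List Int),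
      (match p with
        | [a, b, c, d] =>
          if a = 0 then best
          else
            let value := a * 1000 + b * 100 + c * 10 + d
            if PySem.Int.mod value divisor ≠ 0 then best
            else bestUpd best value
        | _ => best)
      = (match fA divisor p with | some v => bestUpd best v | none => best) := by
    intro best p
    rcases p with _ | ⟨a, _ | ⟨b, _ | ⟨c, _ | ⟨d, _ | ⟨e, t⟩⟩⟩⟩⟩ <;>
      simp only [fA, valOf] <;> split_ifs <;> rfl
  exact (congrArg (fun fn => (PySem.List.permutations digits 4).foldl fn (none : Option Int))
      (funext fun best => funext fun p => hf best p)).trans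
    ((foldl_bestUpd_filterMap (fA divisor) _ none).trans
      (foldl_bestUpd_none _))

-- B as the max? of its candidate list
lemma B_eq_max? (digits : List Int) (divisor : Int) :
    best_permutation_py_alt digits divisor = (candB digits divisor).max? := by
  unfold best_permutation_py_alt candB
  set counts := PySem.Dict.counter digits with hc
  set vals := PySem.List.sorted counts.keys (fun x => x) false with hv
  have hin : ∀ (a b c : Int) (best : Option Int),
      vals.foldl (fun best d =>
        if counts.getD d 0 < 1 + (if d = a then (1:Int) else 0) + (if d = b then (1:Int) else 0) + (if d = c then (1:Int) else 0) then best
        else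
          let value := a * 1000 + b * 100 + c * 10 + d
          if PySem.Int.mod value divisor = 0 then bestUpd best value else best) best
      = ((vals.filterMap (fun d =>
          if counts.getD d 0 < 1 + (if d = a then (1:Int) else 0) + (if d = b then (1:Int) else 0) + (if d = c then (1:Int) else 0) then none
          else if PySem.Int.mod (valOf a b c d) divisor = 0 then some (valOf a b c d) else none))).foldl bestUpd best := by
    intro a b c best
    refine Eq.trans ?_ (foldl_bestUpd_filterMap _ vals best)
    refine congrArg (fun fn => vals.foldl fn best)
      (funext fun best => funext fun d => ?_)
    by_cases h1 : counts.getD d 0 < 1 + (if d = a then (1:Int) else 0) + (if d = b then (1:Int) else 0) + (if d = c then (1:Int) else 0)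
    · rw [if_pos h1, if_pos h1]
    · rw [if_neg h1, if_neg h1]
      show (if PySem.Int.mod (valOf a b c d) divisor = 0 then bestUpd best (valOf a b c d) else best) = _
      by_cases h2 : PySem.Int.mod (valOf a b c d) divisor = 0
      · rw [if_pos h2, if_pos h2]
      · rw [if_neg h2, if_neg h2]
  have hcl : ∀ (a b : Int) (best : Option Int),
      vals.foldl (fun best c =>
        if counts.getD c 0 < 1 + (if c = a then (1:Int) else 0) + (if c = b then (1:Int) else 0) then best
        else vals.foldl (fun best d =>
          if counts.getD d 0 < 1 + (if d = a then (1:Int) else 0) + (if d = b then (1:Int) else 0) + (if d = c then (1:Int) else 0) then best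
          else
            let value := a * 1000 + b * 100 + c * 10 + d
            if PySem.Int.mod value divisor = 0 then bestUpd best value else best) best) best
      = ((vals.flatMap (fun c =>
          if counts.getD c 0 < 1 + (if c = a then (1:Int) else 0) + (if c = b then (1:Int) else 0) then []
          else vals.filterMap (fun d =>
            if counts.getD d 0 < 1 + (if d = a then (1:Int) else 0) + (if d = b then (1:Int) else 0) + (if d = c then (1:Int) else 0) then none
            else if PySem.Int.mod (valOf a b c d) divisor = 0 then some (valOf a b c d) else none))).foldl bestUpd best) := by
    intro a b best
    refine Eq.trans ?_ (foldl_bestUpd_flatMap _ vals best)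
    refine congrArg (fun fn => vals.foldl fn best) (funext fun best => funext fun c => ?_)
    by_cases h : counts.getD c 0 < 1 + (if c = a then (1:Int) else 0) + (if c = b then (1:Int) else 0)
    · rw [if_pos h, if_pos h]; rfl
    · rw [if_neg h, if_neg h]; exact hin a b c best
  have hbl : ∀ (a : Int) (best : Option Int),
      vals.foldl (fun best b =>
        if counts.getD b 0 < 1 + (if b = a then (1:Int) else 0) then best
        else vals.foldl (fun best c =>
          if counts.getD c 0 < 1 + (if c = a then (1:Int) else 0) + (if c = b then (1:Int) else 0) then best
          else vals.foldl (fun best d =>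
            if counts.getD d 0 < 1 + (if d = a then (1:Int) else 0) + (if d = b then (1:Int) else 0) + (if d = c then (1:Int) else 0) then best
            else
              let value := a * 1000 + b * 100 + c * 10 + d
              if PySem.Int.mod value divisor = 0 then bestUpd best value else best) best) best) best
      = ((vals.flatMap (fun b =>
          if counts.getD b 0 < 1 + (if b = a then (1:Int) else 0) then []
          else vals.flatMap (fun c =>
            if counts.getD c 0 < 1 + (if c = a then (1:Int) else 0) + (if c = b then (1:Int) else 0) then []
            else vals.filterMap (fun d =>
              if counts.getD d 0 < 1 + (if d = a then (1:Int) else 0) + (if d = b then (1:Int) else 0) + (if d = c then (1:Int) else 0) then none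
              else if PySem.Int.mod (valOf a b c d) divisor = 0 then some (valOf a b c d) else none)))).foldl bestUpd best) := by
    intro a best
    refine Eq.trans ?_ (foldl_bestUpd_flatMap _ vals best)
    refine congrArg (fun fn => vals.foldl fn best) (funext fun best => funext fun b => ?_)
    by_cases h : counts.getD b 0 < 1 + (if b = a then (1:Int) else 0)
    · rw [if_pos h, if_pos h]; rfl
    · rw [if_neg h, if_neg h]; exact hcl a b best
  refine Eq.trans ?_ (foldl_bestUpd_none _)
  refine Eq.trans ?_ (foldl_bestUpd_flatMap _ vals none)
  refine congrArg (fun fn => vals.foldl fn (none : Option Int))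
    (funext fun best => funext fun a => ?_)
  by_cases h : a = 0
  · rw [if_pos h, if_pos h]; rfl
  · rw [if_neg h, if_neg h]; exact hbl a best

lemma mem_candA (digits : List Int) (divisor : Int) (v : Int) :
    v ∈ (PySem.List.permutations digits 4).filterMap (fA divisor) ↔
      ∃ a b c d, condB digits a b c d ∧ a ≠ 0 ∧
        PySem.Int.mod (valOf a b c d) divisor = 0 ∧ v = valOf a b c d := by
  rw [List.mem_filterMap]
  constructor
  · rintro ⟨p, hp, hf⟩
    have hlen := PySem.List.length_of_mem_permutations hp
    have hsub := subperm_of_mem_permutations hp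
    rcases p with _ | ⟨a, _ | ⟨b, _ | ⟨c, _ | ⟨d, _ | ⟨e, t⟩⟩⟩⟩⟩ <;> simp at hlen
    simp only [fA] at hf
    split_ifs at hf with h1 h2
    exact ⟨a, b, c, d, (subperm_quad_iff digits a b c d).mp hsub, h1, not_not.mp h2,
      (Option.some_inj.mp hf).symm⟩
  · rintro ⟨a, b, c, d, hcond, ha, hmod, rfl⟩
    refine ⟨[a, b, c, d], ?_, ?_⟩
    · exact mem_permutations_of_subperm [a, b, c, d] digits
        ((subperm_quad_iff digits a b c d).mpr hcond)
    · simp [fA, ha, hmod]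

lemma mem_ite_nil {P : Prop} [Decidable P] (L : List Int) (x : Int) :
    (x ∈ if P then ([] : List Int) else L) ↔ ¬P ∧ x ∈ L := by
  split_ifs with h <;> simp [h]

lemma mem_candB (digits : List Int) (divisor : Int) (v : Int) :
    v ∈ candB digits divisor ↔
      ∃ a b c d, condB digits a b c d ∧ a ≠ 0 ∧
        PySem.Int.mod (valOf a b c d) divisor = 0 ∧ v = valOf a b c d := by
  unfold candB
  set counts := PySem.Dict.counter digits with hc
  set vals := PySem.List.sorted counts.keys (fun x => x) false with hv
  have hmem : ∀ x : Int, x ∈ vals ↔ x ∈ digits := by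
    intro x
    rw [hv, PySem.List.mem_sorted, PySem.Dict.keys_counter, PySem.Set.mem_ofList]
  have hgetD : ∀ x : Int, counts.getD x 0 = (digits.count x : Int) :=
    fun x => PySem.Dict.getD_counter digits x
  have hcnt2 : ∀ a b : Int,
      (¬ counts.getD b 0 < 1 + (if b = a then (1:Int) else 0)) ↔
        1 + (if b = a then 1 else 0) ≤ digits.count b := by
    intro a b; rw [hgetD]; split_ifs <;> omega
  have hcnt3 : ∀ a b c : Int,
      (¬ counts.getD c 0 < 1 + (if c = a then (1:Int) else 0) + (if c = b then (1:Int) else 0)) ↔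
        1 + (if c = a then 1 else 0) + (if c = b then 1 else 0) ≤ digits.count c := by
    intro a b c; rw [hgetD]; split_ifs <;> omega
  have hcnt4 : ∀ a b c d : Int,
      (¬ counts.getD d 0 < 1 + (if d = a then (1:Int) else 0) + (if d = b then (1:Int) else 0) + (if d = c then (1:Int) else 0)) ↔
        1 + (if d = a then 1 else 0) + (if d = b then 1 else 0) + (if d = c then 1 else 0) ≤ digits.count d := by
    intro a b c d; rw [hgetD]; split_ifs <;> omega
  simp only [List.mem_flatMap, List.mem_filterMap, mem_ite_nil]
  unfold condB
  constructor
  · rintro ⟨a, hav, ha0, b, hbv, hbcnt, c, hcv, hccnt, d, hdv, hd⟩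
    by_cases h1 : counts.getD d 0 < 1 + (if d = a then (1:Int) else 0) + (if d = b then (1:Int) else 0) + (if d = c then (1:Int) else 0)
    · rw [if_pos h1] at hd
      exact absurd hd (by simp)
    · rw [if_neg h1] at hd
      by_cases h2 : PySem.Int.mod (valOf a b c d) divisor = 0
      · rw [if_pos h2] at hd
        refine ⟨a, b, c, d, ⟨?_, ?_, ?_, ?_⟩, ha0, h2, (Option.some_inj.mp hd).symm⟩
        · exact List.count_pos_iff.mpr ((hmem a).mp hav)
        · exact (hcnt2 a b).mp hbcnt
        · exact (hcnt3 a b c).mp hccnt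
        · exact (hcnt4 a b c d).mp h1
      · rw [if_neg h2] at hd
        exact absurd hd (by simp)
  · rintro ⟨a, b, c, d, ⟨ha, hb', hc', hd'⟩, ha0, hmod, rfl⟩
    refine ⟨a, (hmem a).mpr (List.count_pos_iff.mp ha), ha0,
      b, (hmem b).mpr (List.count_pos_iff.mp (by omega)), (hcnt2 a b).mpr hb',
      c, (hmem c).mpr (List.count_pos_iff.mp (by omega)), (hcnt3 a b c).mpr hc',
      d, (hmem d).mpr (List.count_pos_iff.mp (by omega)), ?_⟩
    rw [if_neg ((hcnt4 a b c d).mpr hd'), if_pos hmod]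

-- ===== VERDICT (by name: the statement is the Claim_ definition above) =====
theorem best_permutation_py_spec : Claim_equal_best_permutation_py := by
  intro digits divisor _ _
  unfold Spec_best_permutation_py
  rw [A_eq_max? digits divisor, B_eq_max? digits divisor]
  exact max?_eq_of_mem_iff (fun v => (mem_candA digits divisor v).trans
    (mem_candB digits divisor v).symm)
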